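-- pv_equiv track=rewrite | github.com/HLoM3/Proyecto2IA | metro2.py | _identificar_transbordos
-- ===== SOURCE A (Python) =====
-- from typing import Dict, List, Set, Tuple, Optional
--
-- def _identificar_transbordos(ruta: List[str]) -> List[Tuple[str, str, str]]:
--     """Identifica puntos de transbordo en una ruta"""
--     transbordos = []
--     linea_actual = None
--
--     for i in range(len(ruta) - 1):
--         estacion = ruta[i]
--         siguiente = ruta[i + 1]
--
--         # Obtener la línea de cada estación
--         linea_actual_str = estacion.split(' L')[-1] if ' L' in estacion else None
--         linea_siguiente_str = siguiente.split(' L')[-1] if ' L' in siguiente else None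
--
--         if linea_actual_str and linea_siguiente_str and linea_actual_str != linea_siguiente_str:
--             transbordos.append((estacion, f"L{linea_actual_str}", f"L{linea_siguiente_str}"))
--
--     return transbordos
-- ===== SOURCE B (Python) =====
-- def _linea(estacion):
--     """Line suffix after ' L', or None when the station names no line."""
--     return estacion.split(' L')[-1] if ' L' in estacion else None
--
--
-- def _identificar_transbordos(ruta):
--     """Identifica puntos de transbordo en una ruta"""
--     # Run-length encode the route into maximal runs of consecutive stations on
--     # the same (possibly absent) line, keeping each run's LAST station.
--     runs = []
--     for e in ruta:
--         l = _linea(e)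
--         if runs and runs[-1][0] == l:
--             runs[-1] = (l, e)
--         else:
--             runs.append((l, e))
--     # A transfer happens exactly at a boundary between two runs with real lines;
--     # adjacent runs differ by construction, so no inequality test is needed.
--     return [(s, f"L{a}", f"L{b}")
--             for (a, s), (b, _) in zip(runs, runs[1:])
--             if a and b]
-- ===== Notes on version B (the rewrite author's own statement) =====
-- stated objective: alternative
-- what changed: B run-length encodes the route into maximal runs of consecutive same-line stations (keeping each run's last station) and then emits one transfer per run boundary whose two run lines are both truthy, with no pairwise a != b comparison, instead of A's index loop over range(len-1) comparing the two parsed lines of every adjacent pair.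
import Mathlib
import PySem

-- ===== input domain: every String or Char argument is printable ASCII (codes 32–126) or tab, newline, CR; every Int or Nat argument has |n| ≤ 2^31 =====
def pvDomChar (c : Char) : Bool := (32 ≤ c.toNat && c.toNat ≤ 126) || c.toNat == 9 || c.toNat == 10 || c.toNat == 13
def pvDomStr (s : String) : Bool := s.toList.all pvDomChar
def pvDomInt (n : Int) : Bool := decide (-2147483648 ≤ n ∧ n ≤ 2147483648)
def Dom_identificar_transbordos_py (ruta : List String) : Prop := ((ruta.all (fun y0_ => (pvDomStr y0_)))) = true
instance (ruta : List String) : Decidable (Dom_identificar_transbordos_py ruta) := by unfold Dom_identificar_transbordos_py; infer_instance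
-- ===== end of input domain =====

-- B run-length encodes the route into maximal runs of consecutive same-line stations
-- (keeping each run's last station) and emits one transfer per boundary between two
-- truthy-line runs, instead of A's index loop comparing the parsed lines of each pair.

-- ===== PORT A =====
def identificar_transbordos_py (ruta : List String) : List (String × String × String) :=
  (PySem.List.pyRange 0 ((ruta.length : Int) - 1) 1).foldl (fun transbordos i =>
    let estacion := PySem.List.pyGetD ruta i ""
    let siguiente := PySem.List.pyGetD ruta (i + 1) ""
    let linea_actual_str : Option String :=
      if PySem.Str.isIn " L" estacion then
        PySem.List.pyGet? ((PySem.Str.split? estacion " L").getD []) (-1)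
      else none
    let linea_siguiente_str : Option String :=
      if PySem.Str.isIn " L" siguiente then
        PySem.List.pyGet? ((PySem.Str.split? siguiente " L").getD []) (-1)
      else none
    match linea_actual_str, linea_siguiente_str with
    | some a, some b =>
        if a ≠ "" ∧ b ≠ "" ∧ a ≠ b then
          transbordos ++ [(estacion, "L" ++ a, "L" ++ b)]
        else transbordos
    | _, _ => transbordos) []

-- ===== PORT B =====
def pvLinea (estacion : String) : Option String :=
  if PySem.Str.isIn " L" estacion then
    PySem.List.pyGet? ((PySem.Str.split? estacion " L").getD []) (-1)
  else none

-- Python truthiness of a parsed line: None and '' are falsy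
def pvTruthy (o : Option String) : Bool := o.getD "" ≠ ""

def identificar_transbordos_py_alt (ruta : List String) : List (String × String × String) :=
  -- the loop building `runs`: `runs[-1] = (l, e)` is dropLast ++ [(l, e)]
  let runs := ruta.foldl (fun runs e =>
    let l := pvLinea e
    match runs.getLast? with
    | some r => if r.1 = l then runs.dropLast ++ [(l, e)] else runs ++ [(l, e)]
    | none => runs ++ [(l, e)]) ([] : List (Option String × String))
  (runs.zip runs.tail).filterMap (fun p =>
    if pvTruthy p.1.1 ∧ pvTruthy p.2.1 then
      some (p.1.2, "L" ++ p.1.1.getD "", "L" ++ p.2.1.getD "")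
    else none)

-- ===== PRECONDITION & SPEC =====
def Spec_identificar_transbordos_py (ruta : List String) (out : List (String × String × String)) : Prop := out = identificar_transbordos_py_alt ruta
instance (ruta : List String) (out : List (String × String × String)) : Decidable (Spec_identificar_transbordos_py ruta out) := by unfold Spec_identificar_transbordos_py; infer_instance

-- ===== CLAIM (what is proved, stated in full; the proofs are below) =====
def Claim_equal_identificar_transbordos_py : Prop := ∀ (ruta : List String), Dom_identificar_transbordos_py ruta → Spec_identificar_transbordos_py ruta (identificar_transbordos_py ruta)

-- ===== LEMMAS AND PROOFS =====

-- one adjacent pair's contribution to A's output, as a list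
def pvStep (e : String) (la lb : Option String) : List (String × String × String) :=
  match la, lb with
  | some a, some b => if a ≠ "" ∧ b ≠ "" ∧ a ≠ b then [(e, "L" ++ a, "L" ++ b)] else []
  | _, _ => []

-- A's loop as structural recursion over adjacent pairs
def pvPairRec : List String → List (String × String × String)
  | e :: s :: rest => pvStep e (pvLinea e) (pvLinea s) ++ pvPairRec (s :: rest)
  | _ => []

-- head-recursive run-length encoding
def pvConsRun (p : Option String × String) (rs : List (Option String × String)) :
    List (Option String × String) :=
  match rs with
  | [] => [p]
  | q :: t => if p.1 = q.1 then q :: t else p :: q :: t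

def pvRunsRec : List String → List (Option String × String)
  | [] => []
  | e :: rest => pvConsRun (pvLinea e, e) (pvRunsRec rest)

-- the boundary emitter of B
def pvEmit (rs : List (Option String × String)) : List (String × String × String) :=
  (rs.zip rs.tail).filterMap (fun p =>
    if pvTruthy p.1.1 ∧ pvTruthy p.2.1 then
      some (p.1.2, "L" ++ p.1.1.getD "", "L" ++ p.2.1.getD "")
    else none)

theorem pv_step_eq (acc : List (String × String × String)) (e s : String) :
    (match pvLinea e, pvLinea s with
     | some a, some b =>
         if a ≠ "" ∧ b ≠ "" ∧ a ≠ b then acc ++ [(e, "L" ++ a, "L" ++ b)] else acc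
     | _, _ => acc) = acc ++ pvStep e (pvLinea e) (pvLinea s) := by
  cases pvLinea e <;> cases pvLinea s <;> simp [pvStep] <;> split_ifs <;> simp

theorem pv_A_flat (ruta : List String) :
    identificar_transbordos_py ruta =
      (PySem.List.pyRange 0 ((ruta.length : Int) - 1) 1).flatMap
        (fun i => pvStep (PySem.List.pyGetD ruta i "")
          (pvLinea (PySem.List.pyGetD ruta i ""))
          (pvLinea (PySem.List.pyGetD ruta (i + 1) ""))) :=
  (PySem.List.foldl_congr_mem _ _
      (fun acc i => acc ++ pvStep (PySem.List.pyGetD ruta i "")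
        (pvLinea (PySem.List.pyGetD ruta i ""))
        (pvLinea (PySem.List.pyGetD ruta (i + 1) ""))) []
      (fun acc i _ => pv_step_eq acc _ _)).trans
    ((PySem.List.foldl_append_eq_flatMap _ _ _).trans (List.nil_append _))

theorem pv_flat_pair (ruta : List String) :
    (List.range (ruta.length - 1)).flatMap
      (fun k => pvStep (ruta.getD k "") (pvLinea (ruta.getD k ""))
        (pvLinea (ruta.getD (k + 1) ""))) = pvPairRec ruta := by
  induction ruta with
  | nil => rfl
  | cons e rest ih =>
    cases rest with
    | nil => rfl
    | cons s t =>
      have hlen : (e :: s :: t : List String).length - 1 = ((s :: t : List String).length - 1) + 1 := by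
        simp
      rw [hlen, List.range_succ_eq_map, List.flatMap_cons, List.flatMap_map, pvPairRec, ← ih]
      simp [List.getD]

theorem pv_A_pair (ruta : List String) :
    identificar_transbordos_py ruta = pvPairRec ruta := by
  rw [pv_A_flat]
  have hn : (((ruta.length : Int)) - 1 - 0).toNat = ruta.length - 1 := by omega
  rw [PySem.List.pyRange_one, hn, List.flatMap_map, ← pv_flat_pair]
  congr 1
  funext k
  have e2 : ((k : Nat) : Int) + 1 = (((k + 1 : Nat)) : Int) := by push_cast; ring
  simp only [zero_add, e2, PySem.List.pyGetD_natCast]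

-- the run built by B's loop ends with the just-processed station
theorem pv_step_getLast (runs : List (Option String × String)) (e : String) :
    ((match runs.getLast? with
      | some r => if r.1 = pvLinea e then runs.dropLast ++ [(pvLinea e, e)]
                  else runs ++ [(pvLinea e, e)]
      | none => runs ++ [(pvLinea e, e)]) : List (Option String × String)).getLast?
      = some (pvLinea e, e) := by
  cases h : runs.getLast? <;> simp <;> split_ifs <;> simp

-- junction merge of an accumulated prefix with a right-recursive run list
def pvMergeL (acc rs : List (Option String × String)) : List (Option String × String) :=
  match acc.getLast?, rs with
  | some r, q :: t => if r.1 = q.1 then acc.dropLast ++ (q :: t) else acc ++ (q :: t)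
  | none, _ => acc ++ rs
  | _, [] => acc

theorem pv_foldl_runs (ruta : List String) (acc : List (Option String × String)) :
    ruta.foldl (fun runs e =>
      let l := pvLinea e
      match runs.getLast? with
      | some r => if r.1 = l then runs.dropLast ++ [(l, e)] else runs ++ [(l, e)]
      | none => runs ++ [(l, e)]) acc = pvMergeL acc (pvRunsRec ruta) := by
  induction ruta generalizing acc with
  | nil => cases h : acc.getLast? <;> simp [pvRunsRec, pvMergeL, h]
  | cons e rest ih =>
    rw [List.foldl_cons, ih]
    rw [pvRunsRec]
    cases hr : pvRunsRec rest with
    | nil =>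
      simp only [pvConsRun]
      cases h : acc.getLast? <;> simp [pvMergeL, h] <;> split_ifs <;> simp [pvMergeL]
    | cons q t =>
      simp only [pvConsRun]
      by_cases hle : pvLinea e = q.1
      · rw [if_pos hle]
        -- step acc e ends in (pvLinea e, e); it merges with q
        have hlast := pv_step_getLast acc e
        cases h : acc.getLast? with
        | none =>
          have hacc : acc = [] := List.getLast?_eq_none_iff.mp h
          subst hacc
          simp [pvMergeL, hle]
        | some r =>
          simp only [h]
          by_cases hrl : r.1 = pvLinea e
          · simp only [if_pos hrl]
            simp [pvMergeL, hle, h, hrl.trans hle]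
          · simp only [if_neg hrl]
            have hrq : ¬ r.1 = q.1 := fun hh => hrl (hh.trans hle.symm)
            simp [pvMergeL, hle, h, hrq]
      · rw [if_neg hle]
        cases h : acc.getLast? with
        | none =>
          have hacc : acc = [] := List.getLast?_eq_none_iff.mp h
          subst hacc
          simp [pvMergeL, hle]
        | some r =>
          by_cases hrl : r.1 = pvLinea e
          · have h2 : (acc.dropLast ++ [(pvLinea e, e)]).getLast? = some (pvLinea e, e) := by simp
            simp [pvMergeL, h, hrl, h2, hle]
          · have h2 : (acc ++ [(pvLinea e, e)]).getLast? = some (pvLinea e, e) := by simp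
            simp [pvMergeL, h, hrl, h2, hle]

-- the head of the run list of a nonempty route carries the first station's line
theorem pv_runs_head (s : String) (rest : List String) :
    ∃ st rs', pvRunsRec (s :: rest) = (pvLinea s, st) :: rs' := by
  rw [pvRunsRec]
  cases hr : pvRunsRec rest with
  | nil => exact ⟨s, [], rfl⟩
  | cons q t =>
    simp only [pvConsRun]
    by_cases h : pvLinea s = q.1
    · exact ⟨q.2, t, by simp [h]⟩
    · exact ⟨s, q :: t, by simp [h]⟩

-- at a boundary the two lines differ, so B's truthiness test equals A's full test
theorem pv_emit_boundary (e : String) (la lb : Option String) (hne : la ≠ lb) :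
    ((if pvTruthy la ∧ pvTruthy lb then
        some (e, "L" ++ la.getD "", "L" ++ lb.getD "")
      else none) : Option (String × String × String)).toList = pvStep e la lb := by
  cases la <;> cases lb <;> simp [pvStep, pvTruthy] <;> split_ifs <;> simp_all

theorem pv_emit_pair (ruta : List String) :
    pvEmit (pvRunsRec ruta) = pvPairRec ruta := by
  induction ruta with
  | nil => rfl
  | cons e rest ih =>
    cases rest with
    | nil => rfl
    | cons s t =>
      obtain ⟨st, rs', hr⟩ := pv_runs_head s t
      rw [pvRunsRec, hr, pvConsRun]
      by_cases h : pvLinea e = pvLinea s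
      · simp only [if_pos h]
        rw [← hr, ih, pvPairRec]
        have : pvStep e (pvLinea e) (pvLinea s) = [] := by
          rw [h]; cases pvLinea s <;> simp [pvStep]
        rw [this, List.nil_append]
      · simp only [if_neg h]
        rw [pvPairRec, ← pv_emit_boundary e _ _ h, ← ih, hr]
        simp only [pvEmit, List.zip_cons_cons, List.tail_cons, List.filterMap_cons]
        split_ifs <;> simp

theorem pv_equal (ruta : List String) :
    identificar_transbordos_py ruta = identificar_transbordos_py_alt ruta := by
  rw [pv_A_pair]
  show _ = pvEmit (ruta.foldl _ [])
  rw [pv_foldl_runs]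
  have : pvMergeL [] (pvRunsRec ruta) = pvRunsRec ruta := by
    cases pvRunsRec ruta <;> simp [pvMergeL]
  rw [this, pv_emit_pair]

-- ===== VERDICT (by name: the statement is the Claim_ definition above) =====
theorem identificar_transbordos_py_spec : Claim_equal_identificar_transbordos_py := by
  intro ruta _
  unfold Spec_identificar_transbordos_py
  exact (pv_equal ruta)
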